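-- pv_equiv track=rewrite | github.com/jordansatler/SNPtoAFS | SNPtoAFSready.py | phase
-- ===== SOURCE A (Python) =====
-- ambig = {"Y":["C", "T"], "R":["A", "G"], "W":["A", "T"], "S":["C", "G"],
--          "K":["G","T"], "M":["A", "C"]}
--
-- def phase(SNP_dup):
--     """resolve SNPs that contain ambiguity codes"""
--     count = 2
--
--     phased = []
--     for line in SNP_dup:
--         line = line.strip().split()
--
--         if count % 2 == 0:
--             seq = [line[0] + "_a"]
--         else:
--             seq = [line[0] + "_b"]
--
--         for bp in line[1:]:
--
--             for nc in bp:
--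
--                 if nc in ambig:
--
--                     if count % 2 == 0:
--                         seq.append(ambig[nc][0])
--
--                     else:
--                         seq.append(ambig[nc][1])
--
--                 #Skip loci that are invariant
--                 elif nc == "_":
--                     pass
--
--                 else:
--                     seq.append(nc)
--         phased.append(seq)
--         count += 1
--     return phased
-- ===== SOURCE B (Python) =====
-- _SUB = [("Y", "C", "T"), ("R", "A", "G"), ("W", "A", "T"),
--         ("S", "C", "G"), ("K", "G", "T"), ("M", "A", "C")]
--
--
-- def _resolve(raw, phase_idx):
--     toks = raw.strip().split()
--     body = "".join(toks[1:])
--     for code, r0, r1 in _SUB: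
--         body = body.replace(code, r0 if phase_idx == 0 else r1)
--     body = body.replace("_", "")
--     return [toks[0] + ("_a" if phase_idx == 0 else "_b")] + list(body)
--
--
-- def phase(SNP_dup):
--     """resolve SNPs that contain ambiguity codes"""
--     phased = []
--     i = 0
--     n = len(SNP_dup)
--     while i + 1 < n:
--         phased.append(_resolve(SNP_dup[i], 0))
--         phased.append(_resolve(SNP_dup[i + 1], 1))
--         i += 2
--     if i < n:
--         phased.append(_resolve(SNP_dup[i], 0))
--     return phased
-- ===== Notes on version B (the rewrite author's own statement) =====
-- stated objective: alternative
-- what changed: Replaces A's counter-driven loop with per-character dict lookups and if/elif branching by a pair-chunked outer while loop (no parity counter) whose lines are resolved by staged whole-string replace passes, one per ambiguity code, plus one pass deleting underscores.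
import Mathlib
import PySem

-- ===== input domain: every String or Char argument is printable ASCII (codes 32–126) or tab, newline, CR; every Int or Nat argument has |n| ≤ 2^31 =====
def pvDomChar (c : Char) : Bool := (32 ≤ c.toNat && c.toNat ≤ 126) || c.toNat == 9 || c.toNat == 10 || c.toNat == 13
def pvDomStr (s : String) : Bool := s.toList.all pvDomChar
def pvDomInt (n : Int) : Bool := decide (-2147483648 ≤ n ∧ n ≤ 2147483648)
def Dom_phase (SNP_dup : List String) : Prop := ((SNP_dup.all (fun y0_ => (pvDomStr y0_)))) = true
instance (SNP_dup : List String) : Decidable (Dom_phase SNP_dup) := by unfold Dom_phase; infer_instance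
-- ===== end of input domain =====

-- B replaces A's counter-driven loop (per-char dict lookup + if/elif chain) by a pair-chunked
-- outer loop (no parity counter) whose lines are resolved by staged whole-string replace passes,
-- one per ambiguity code, plus one pass deleting underscores (objective: alternative).
-- Return-value equivalence only; neither mutates its argument.

-- ===== PORT A =====
def ambig : PySem.Dict Char (List String) :=
  (((((PySem.Dict.empty.insert 'Y' ["C","T"]).insert 'R' ["A","G"]).insert 'W'
      ["A","T"]).insert 'S' ["C","G"]).insert 'K' ["G","T"]).insert 'M' ["A","C"]

-- body of A's innermost 'for nc in bp' loop
def phaseChar (count : Int) (seq : List String) (nc : Char) : List String :=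
  match ambig.get? nc with
  | some v =>
      if PySem.Int.mod count 2 = 0 then seq ++ [(PySem.List.pyGet? v 0).getD ""]
      else seq ++ [(PySem.List.pyGet? v 1).getD ""]
  | none => if nc = '_' then seq else seq ++ [String.ofList [nc]]

def phase (SNP_dup : List String) : List (List String) :=
  (SNP_dup.foldl (fun (st : Int × List (List String)) raw =>
    let count := st.1
    let line := PySem.Str.split₀ (PySem.Str.strip raw)
    -- line[0] raises IndexError on a token-less line: excluded by Pre_phase (getD unreached there)
    let seq0 : List String :=
      if PySem.Int.mod count 2 = 0 then [((PySem.List.pyGet? line 0).getD "") ++ "_a"]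
      else [((PySem.List.pyGet? line 0).getD "") ++ "_b"]
    let seq := (PySem.List.slice line (some 1) none).foldl
      (fun sq bp => bp.toList.foldl (phaseChar count) sq) seq0
    (count + 1, st.2 ++ [seq])) (2, [])).2

-- ===== PORT B =====
-- Source B's _SUB table: (code, even-phase replacement, odd-phase replacement)
def subTable : List (String × String × String) :=
  [("Y","C","T"), ("R","A","G"), ("W","A","T"), ("S","C","G"), ("K","G","T"), ("M","A","C")]

-- Source B's _resolve: join the body tokens, run one whole-string replace pass per ambiguity
-- code (replacement picked by phase_idx), delete underscores, then split into 1-char strings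
def resolveLine (raw : String) (phaseIdx : Nat) : List String :=
  let toks := PySem.Str.split₀ (PySem.Str.strip raw)
  let body0 := PySem.Str.join "" (PySem.List.slice toks (some 1) none)
  let body1 := subTable.foldl
    (fun b t => PySem.Str.replace b t.1 (if phaseIdx = 0 then t.2.1 else t.2.2)) body0
  let body := PySem.Str.replace body1 "_" ""
  -- toks[0] raises IndexError on a token-less line: excluded by Pre_phase (getD unreached there)
  [((PySem.List.pyGet? toks 0).getD "") ++ (if phaseIdx = 0 then "_a" else "_b")]
    ++ body.toList.map (fun c => String.ofList [c])

-- Source B's while loop: two lines per iteration, plus a possible odd tail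
def phase_alt (SNP_dup : List String) : List (List String) :=
  match SNP_dup with
  | [] => []
  | [x] => [resolveLine x 0]
  | x :: y :: rest => resolveLine x 0 :: resolveLine y 1 :: phase_alt rest

-- ===== PRECONDITION & SPEC =====
-- Pre_ excludes inputs with a line holding no whitespace-separated token: there A (line[0])
-- and B (toks[0]) both raise IndexError.
def Pre_phase (SNP_dup : List String) : Prop :=
  ∀ s ∈ SNP_dup, PySem.Str.split₀ (PySem.Str.strip s) ≠ []
instance (SNP_dup : List String) : Decidable (Pre_phase SNP_dup) := by
  unfold Pre_phase; infer_instance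
def pvWitness_phase : List String := ["s1 ACY_R G", "s2 WSKM"]

def Spec_phase (SNP_dup : List String) (out : List (List String)) : Prop := out = phase_alt SNP_dup
instance (SNP_dup : List String) (out : List (List String)) : Decidable (Spec_phase SNP_dup out) := by unfold Spec_phase; infer_instance

-- ===== CLAIM (what is proved, stated in full; the proofs are below) =====
def Claim_equal_phase : Prop := ∀ (SNP_dup : List String), Dom_phase SNP_dup → Pre_phase SNP_dup → Spec_phase SNP_dup (phase SNP_dup)

-- ===== LEMMAS AND PROOFS =====

-- the per-character resolution tables both sides amount to (none = character deleted)
def trans0 (c : Char) : Option Char :=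
  if c = 'Y' then some 'C' else if c = 'R' then some 'A' else if c = 'W' then some 'A'
  else if c = 'S' then some 'C' else if c = 'K' then some 'G' else if c = 'M' then some 'A'
  else if c = '_' then none else some c

def trans1 (c : Char) : Option Char :=
  if c = 'Y' then some 'T' else if c = 'R' then some 'G' else if c = 'W' then some 'T'
  else if c = 'S' then some 'G' else if c = 'K' then some 'T' else if c = 'M' then some 'C'
  else if c = '_' then none else some c

-- the common per-line normal form both ports are reduced to
def bline (i : Int) (x : String) : List String :=
  ((PySem.List.pyGet? (PySem.Str.split₀ (PySem.Str.strip x)) 0).getD ""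
      ++ (if PySem.Int.mod i 2 = 0 then "_a" else "_b")) ::
    ((PySem.Chars.join [] (((PySem.Str.split₀ (PySem.Str.strip x)).drop 1).map
        String.toList)).filterMap
      (if PySem.Int.mod i 2 = 0 then trans0 else trans1)).map (fun c => String.ofList [c])

-- ---- A-side: the counter loop is a map of bline over enumerate ----

theorem phaseChar_eq (count : Int) (seq : List String) (nc : Char) :
    phaseChar count seq nc =
      seq ++ (((if PySem.Int.mod count 2 = 0 then trans0 else trans1) nc).toList.map
        (fun c => String.ofList [c])) := by
  by_cases hp : (2:Int) ∣ count <;>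
  · by_cases h1 : nc = 'Y'
    · subst h1
      have hg : ambig.get? 'Y' = some ["C","T"] := rfl
      simp [phaseChar, hg, trans0, trans1, hp, PySem.List.pyGet?, PySem.List.pyIdx?]
    · by_cases h2 : nc = 'R'
      · subst h2
        have hg : ambig.get? 'R' = some ["A","G"] := rfl
        simp [phaseChar, hg, trans0, trans1, hp, PySem.List.pyGet?, PySem.List.pyIdx?]
      · by_cases h3 : nc = 'W'
        · subst h3
          have hg : ambig.get? 'W' = some ["A","T"] := rfl
          simp [phaseChar, hg, trans0, trans1, hp, PySem.List.pyGet?, PySem.List.pyIdx?]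
        · by_cases h4 : nc = 'S'
          · subst h4
            have hg : ambig.get? 'S' = some ["C","G"] := rfl
            simp [phaseChar, hg, trans0, trans1, hp, PySem.List.pyGet?, PySem.List.pyIdx?]
          · by_cases h5 : nc = 'K'
            · subst h5
              have hg : ambig.get? 'K' = some ["G","T"] := rfl
              simp [phaseChar, hg, trans0, trans1, hp, PySem.List.pyGet?, PySem.List.pyIdx?]
            · by_cases h6 : nc = 'M'
              · subst h6
                have hg : ambig.get? 'M' = some ["A","C"] := rfl
                simp [phaseChar, hg, trans0, trans1, hp, PySem.List.pyGet?, PySem.List.pyIdx?]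
              · have hnone : ambig.get? nc = none := by
                  simp [ambig, PySem.Dict.get?_insert, h1, h2, h3, h4, h5, h6]
                by_cases h7 : nc = '_'
                · subst h7; simp [phaseChar, hnone, trans0, trans1, hp]
                · simp [phaseChar, hnone, trans0, trans1, hp, h1, h2, h3, h4, h5, h6, h7]

theorem foldl_phaseChar (count : Int) (cs : List Char) (seq : List String) :
    cs.foldl (phaseChar count) seq =
      seq ++ (cs.filterMap (if PySem.Int.mod count 2 = 0 then trans0 else trans1)).map
        (fun c => String.ofList [c]) := by
  induction cs generalizing seq with
  | nil => simp
  | cons c cs ih =>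
      simp only [List.foldl_cons, ih, phaseChar_eq, List.filterMap_cons]
      cases h : (if PySem.Int.mod count 2 = 0 then trans0 else trans1) c <;> simp

theorem join_nil_sep_cons (b : List Char) (rest : List (List Char)) :
    PySem.Chars.join [] (b :: rest) = b ++ PySem.Chars.join [] rest := by
  cases rest with
  | nil => simp [PySem.Chars.join_singleton, PySem.Chars.join_nil]
  | cons a r => rw [PySem.Chars.join_cons_cons]; simp

theorem foldl_lines (count : Int) (t : List String) (seq : List String) :
    t.foldl (fun sq bp => bp.toList.foldl (phaseChar count) sq) seq =
      seq ++ ((PySem.Chars.join [] (t.map String.toList)).filterMap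
        (if PySem.Int.mod count 2 = 0 then trans0 else trans1)).map (fun c => String.ofList [c]) := by
  induction t generalizing seq with
  | nil => simp [PySem.Chars.join_nil]
  | cons b t ih =>
      rw [List.foldl_cons, foldl_phaseChar, ih, List.map_cons, join_nil_sep_cons,
        List.filterMap_append, List.map_append, List.append_assoc]

theorem mod_sub_two (c : Int) : PySem.Int.mod (c - 2) 2 = PySem.Int.mod c 2 := by
  rw [PySem.Int.mod_eq_emod_of_pos (a := c - 2) (by omega),
    PySem.Int.mod_eq_emod_of_pos (a := c) (by omega)]
  omega

theorem line_eq (c : Int) (x : String) (hx : PySem.Str.split₀ (PySem.Str.strip x) ≠ []) :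
    (PySem.List.slice (PySem.Str.split₀ (PySem.Str.strip x)) (some 1) none).foldl
      (fun sq bp => bp.toList.foldl (phaseChar c) sq)
      (if PySem.Int.mod c 2 = 0
        then [(PySem.List.pyGet? (PySem.Str.split₀ (PySem.Str.strip x)) 0).getD "" ++ "_a"]
        else [(PySem.List.pyGet? (PySem.Str.split₀ (PySem.Str.strip x)) 0).getD "" ++ "_b"]) =
    bline (c - 2) x := by
  unfold bline
  obtain ⟨hd, tl, htoks⟩ : ∃ hd tl, PySem.Str.split₀ (PySem.Str.strip x) = hd :: tl := by
    cases hh : PySem.Str.split₀ (PySem.Str.strip x) with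
    | nil => exact absurd hh hx
    | cons a b => exact ⟨a, b, rfl⟩
  rw [htoks, mod_sub_two, PySem.List.slice_from_one, List.tail_cons, foldl_lines]
  simp only [List.drop_one, List.tail_cons]
  by_cases hp : PySem.Int.mod c 2 = 0
  · simp only [if_pos hp, List.singleton_append]
  · simp only [if_neg hp, List.singleton_append]

theorem phase_loop (lst : List String) (c : Int) (acc : List (List String))
    (h : ∀ s ∈ lst, PySem.Str.split₀ (PySem.Str.strip s) ≠ []) :
    (lst.foldl (fun (st : Int × List (List String)) raw =>
      let count := st.1
      let line := PySem.Str.split₀ (PySem.Str.strip raw)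
      let seq0 : List String :=
        if PySem.Int.mod count 2 = 0 then [((PySem.List.pyGet? line 0).getD "") ++ "_a"]
        else [((PySem.List.pyGet? line 0).getD "") ++ "_b"]
      let seq := (PySem.List.slice line (some 1) none).foldl
        (fun sq bp => bp.toList.foldl (phaseChar count) sq) seq0
      (count + 1, st.2 ++ [seq])) (c, acc)).2 =
    acc ++ (PySem.List.enumerate lst (c - 2)).map (fun p => bline p.1 p.2) := by
  induction lst generalizing c acc with
  | nil => rw [List.foldl_nil, PySem.List.enumerate_nil, List.map_nil, List.append_nil]
  | cons x xs ih =>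
      have hx := h x (by simp)
      have hxs : ∀ s ∈ xs, PySem.Str.split₀ (PySem.Str.strip s) ≠ [] :=
        fun s hs => h s (by simp [hs])
      rw [List.foldl_cons, PySem.List.enumerate_cons]
      simp only
      rw [ih _ _ hxs]
      have harith : c + 1 - 2 = c - 2 + 1 := by omega
      rw [harith, List.map_cons, line_eq c x hx]
      have hg : bline (c - 2, x).1 (c - 2, x).2 = bline (c - 2) x := rfl
      rw [hg, List.append_assoc, List.singleton_append]

-- ---- B-side: the replace chain is a filterMap, the pair loop is a map over enumerate ----

-- one whole-string replace pass with a 1-char pattern is a flatMap over the characters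
theorem replace_go_single (a : Char) (new : List Char) :
    ∀ (l : List Char) (fuel : Nat) (acc : List Char), l.length ≤ fuel →
      PySem.Chars.replace.go [a] new fuel l acc
        = acc.reverse ++ l.flatMap (fun c => if c = a then new else [c]) := by
  intro l
  induction l with
  | nil => intro fuel acc _; cases fuel <;> simp [PySem.Chars.replace.go]
  | cons c t ih =>
      intro fuel acc hlen
      cases fuel with
      | zero => simp at hlen
      | succ f =>
          rw [PySem.Chars.replace.go]
          have hlen' : t.length ≤ f := by simpa using hlen
          by_cases hc : a = c
          · subst hc
            rw [if_pos (by simp [List.isPrefixOf])]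
            simp only [List.length_cons, List.length_nil, List.drop_succ_cons, List.drop_zero]
            rw [ih f (new.reverse ++ acc) hlen']
            simp
          · rw [if_neg (by simp [List.isPrefixOf, hc])]
            rw [ih f (c :: acc) hlen']
            have hc' : ¬ c = a := fun h => hc h.symm
            simp [hc']

theorem replace_single (a : Char) (new s : List Char) :
    PySem.Chars.replace s [a] new = s.flatMap (fun c => if c = a then new else [c]) := by
  unfold PySem.Chars.replace
  rw [if_neg (by simp)]
  rw [replace_go_single a new s s.length [] le_rfl]
  simp

theorem filterMap_eq_flatMap {α β : Type} (f : α → Option β) (l : List α) :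
    l.filterMap f = l.flatMap (fun a => (f a).toList) := by
  induction l with
  | nil => rfl
  | cons x xs ih => cases h : f x <;> simp [h, ih]

-- the chained replaces equal one filterMap through the even/odd table
theorem chain_even (s : List Char) :
    PySem.Chars.replace (PySem.Chars.replace (PySem.Chars.replace (PySem.Chars.replace
      (PySem.Chars.replace (PySem.Chars.replace (PySem.Chars.replace s
        ['Y'] ['C']) ['R'] ['A']) ['W'] ['A']) ['S'] ['C']) ['K'] ['G']) ['M'] ['A'])
      ['_'] [] = s.filterMap trans0 := by
  simp only [replace_single, List.flatMap_assoc, filterMap_eq_flatMap]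
  apply List.flatMap_congr
  intro c _
  by_cases h1 : c = 'Y'; · subst h1; rfl
  by_cases h2 : c = 'R'; · subst h2; rfl
  by_cases h3 : c = 'W'; · subst h3; rfl
  by_cases h4 : c = 'S'; · subst h4; rfl
  by_cases h5 : c = 'K'; · subst h5; rfl
  by_cases h6 : c = 'M'; · subst h6; rfl
  by_cases h7 : c = '_'; · subst h7; rfl
  simp [trans0, h1, h2, h3, h4, h5, h6, h7]

theorem chain_odd (s : List Char) :
    PySem.Chars.replace (PySem.Chars.replace (PySem.Chars.replace (PySem.Chars.replace
      (PySem.Chars.replace (PySem.Chars.replace (PySem.Chars.replace s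
        ['Y'] ['T']) ['R'] ['G']) ['W'] ['T']) ['S'] ['G']) ['K'] ['T']) ['M'] ['C'])
      ['_'] [] = s.filterMap trans1 := by
  simp only [replace_single, List.flatMap_assoc, filterMap_eq_flatMap]
  apply List.flatMap_congr
  intro c _
  by_cases h1 : c = 'Y'; · subst h1; rfl
  by_cases h2 : c = 'R'; · subst h2; rfl
  by_cases h3 : c = 'W'; · subst h3; rfl
  by_cases h4 : c = 'S'; · subst h4; rfl
  by_cases h5 : c = 'K'; · subst h5; rfl
  by_cases h6 : c = 'M'; · subst h6; rfl
  by_cases h7 : c = '_'; · subst h7; rfl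
  simp [trans1, h1, h2, h3, h4, h5, h6, h7]

theorem resolve_even (x : String) : resolveLine x 0 = bline 0 x := by
  unfold resolveLine bline
  simp only [subTable, List.foldl_cons, List.foldl_nil, reduceIte]
  have h1 : (if PySem.Int.mod (0:Int) 2 = 0 then ("_a":String) else "_b") = "_a" := by decide
  have h2 : (if PySem.Int.mod (0:Int) 2 = 0 then trans0 else trans1) = trans0 := by
    rw [if_pos (by decide)]
  rw [h1, h2, PySem.List.slice_from_one, ← List.drop_one, List.singleton_append]
  refine congrArg (List.cons _) ?_
  refine congrArg (List.map (fun c => String.ofList [c])) ?_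
  have hY : ("Y" : String).toList = ['Y'] := rfl
  have hR : ("R" : String).toList = ['R'] := rfl
  have hW : ("W" : String).toList = ['W'] := rfl
  have hS : ("S" : String).toList = ['S'] := rfl
  have hK : ("K" : String).toList = ['K'] := rfl
  have hM : ("M" : String).toList = ['M'] := rfl
  have hA : ("A" : String).toList = ['A'] := rfl
  have hC : ("C" : String).toList = ['C'] := rfl
  have hG : ("G" : String).toList = ['G'] := rfl
  have hU : ("_" : String).toList = ['_'] := rfl
  have hE : ("" : String).toList = ([] : List Char) := rfl
  simp only [PySem.Str.toList_replace, PySem.Str.toList_join, hY, hR, hW, hS, hK, hM,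
    hA, hC, hG, hU, hE]
  exact chain_even _

theorem resolve_odd (x : String) : resolveLine x 1 = bline 1 x := by
  unfold resolveLine bline
  simp only [subTable, List.foldl_cons, List.foldl_nil]
  have h1 : (if PySem.Int.mod (1:Int) 2 = 0 then ("_a":String) else "_b") = "_b" := by decide
  have h2 : (if PySem.Int.mod (1:Int) 2 = 0 then trans0 else trans1) = trans1 := by
    rw [if_neg (by decide)]
  rw [h1, h2, PySem.List.slice_from_one, ← List.drop_one, List.singleton_append]
  refine congrArg (List.cons _) ?_
  refine congrArg (List.map (fun c => String.ofList [c])) ?_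
  have hY : ("Y" : String).toList = ['Y'] := rfl
  have hR : ("R" : String).toList = ['R'] := rfl
  have hW : ("W" : String).toList = ['W'] := rfl
  have hS : ("S" : String).toList = ['S'] := rfl
  have hK : ("K" : String).toList = ['K'] := rfl
  have hM : ("M" : String).toList = ['M'] := rfl
  have hU : ("_" : String).toList = ['_'] := rfl
  have hE : ("" : String).toList = ([] : List Char) := rfl
  simp only [PySem.Str.toList_replace, PySem.Str.toList_join, hY, hR, hW, hS, hK, hM,
    hU, hE]
  exact chain_odd _

theorem bline_even (n : Int) (h : PySem.Int.mod n 2 = 0) (x : String) :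
    bline n x = bline 0 x := by
  simp only [bline, h, show PySem.Int.mod (0:Int) 2 = 0 from by decide]

theorem bline_odd (n : Int) (h : PySem.Int.mod n 2 = 0) (x : String) :
    bline (n + 1) x = bline 1 x := by
  have h1 : PySem.Int.mod (n + 1) 2 = 1 := by
    rw [PySem.Int.mod_eq_emod_of_pos (a := n + 1) (by omega)]
    rw [PySem.Int.mod_eq_emod_of_pos (a := n) (by omega)] at h
    omega
  simp only [bline, h1, show PySem.Int.mod (1:Int) 2 = 1 from by decide]

theorem mod_add_two (n : Int) (h : PySem.Int.mod n 2 = 0) :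
    PySem.Int.mod (n + 1 + 1) 2 = 0 := by
  rw [PySem.Int.mod_eq_emod_of_pos (a := n + 1 + 1) (by omega)]
  rw [PySem.Int.mod_eq_emod_of_pos (a := n) (by omega)] at h
  omega

theorem phase_alt_enum (l : List String) : ∀ (n : Int), PySem.Int.mod n 2 = 0 →
    (PySem.List.enumerate l n).map (fun p => bline p.1 p.2) = phase_alt l := by
  induction l using phase_alt.induct with
  | case1 => intro n hn; simp [phase_alt, PySem.List.enumerate_nil]
  | case2 x =>
      intro n hn
      rw [PySem.List.enumerate_cons, PySem.List.enumerate_nil]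
      simp only [List.map_cons, List.map_nil]
      rw [show bline (n, x).1 (n, x).2 = bline n x from rfl, bline_even n hn]
      simp [phase_alt, resolve_even]
  | case3 x y rest ih =>
      intro n hn
      rw [PySem.List.enumerate_cons, PySem.List.enumerate_cons]
      simp only [List.map_cons]
      rw [show bline (n, x).1 (n, x).2 = bline n x from rfl,
        show bline (n + 1, y).1 (n + 1, y).2 = bline (n + 1) y from rfl,
        bline_even n hn, bline_odd n hn, ih (n + 1 + 1) (mod_add_two n hn)]
      simp [phase_alt, resolve_even, resolve_odd]

-- ===== VERDICT (by name: the statement is the Claim_ definition above) =====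
theorem phase_spec : Claim_equal_phase := by
  intro SNP_dup _ hpre
  unfold Spec_phase phase
  rw [phase_loop SNP_dup 2 [] hpre, show (2 : Int) - 2 = 0 by norm_num, List.nil_append]
  exact phase_alt_enum SNP_dup 0 (by decide)
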